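-- pv_equiv track=rewrite | github.com/amoyzaskia33-max/multi-job | app/core/tools/command.py | perintah_diizinkan_oleh_prefix
-- ===== SOURCE A (Python) =====
-- from typing import Any, Dict, List
--
-- def perintah_diizinkan_oleh_prefix(perintah: str, daftar_prefix: List[str]) -> bool:
--     teks = str(perintah or "").strip().lower()
--     if not teks:
--         return False
--     for prefix in daftar_prefix:
--         prefix_clean = str(prefix or "").strip().lower()
--         if not prefix_clean:
--             continue
--         if teks == prefix_clean or teks.startswith(prefix_clean + " "):
--             return True
--     return False
-- ===== SOURCE B (Python) =====
-- from typing import List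
--
-- def perintah_diizinkan_oleh_prefix(perintah: str, daftar_prefix: List[str]) -> bool:
--     teks = str(perintah or "").strip().lower()
--     if not teks:
--         return False
--     allowed = {p for p in (str(q or "").strip().lower() for q in daftar_prefix) if p}
--     if teks in allowed:
--         return True
--     for i in range(len(teks)):
--         if teks[i] == ' ' and teks[:i] in allowed:
--             return True
--     return False
-- ===== Notes on version B (the rewrite author's own statement) =====
-- stated objective: alternative
-- what changed: Instead of scanning the prefix list and testing equality/startswith per prefix, B precomputes the set of cleaned non-empty prefixes once and then checks the query itself and each teks[:i] at a space position against that set.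
import Mathlib
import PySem

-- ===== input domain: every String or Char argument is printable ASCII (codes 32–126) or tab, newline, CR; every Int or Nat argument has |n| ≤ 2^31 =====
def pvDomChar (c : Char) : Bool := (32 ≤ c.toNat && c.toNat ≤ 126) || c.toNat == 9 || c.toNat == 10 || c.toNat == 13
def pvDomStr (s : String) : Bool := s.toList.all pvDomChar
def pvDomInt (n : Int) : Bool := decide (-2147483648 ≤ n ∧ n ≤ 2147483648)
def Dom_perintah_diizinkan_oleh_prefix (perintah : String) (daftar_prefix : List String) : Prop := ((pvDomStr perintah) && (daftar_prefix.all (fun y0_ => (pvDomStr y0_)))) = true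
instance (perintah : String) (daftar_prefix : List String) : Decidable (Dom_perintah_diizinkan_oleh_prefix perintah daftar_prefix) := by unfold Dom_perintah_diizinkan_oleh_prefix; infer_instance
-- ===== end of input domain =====

-- B replaces A's per-prefix scan (clean every prefix, then compare / startswith) by one precomputed
-- set of cleaned prefixes plus a scan over the query's space positions doing set lookups (objective: alternative).

-- ===== PORT A =====
-- the 'for prefix in daftar_prefix' loop with its early return
def pvALoop (teks : String) : List String → Bool
  | [] => false
  | p :: rest =>
    let pc := PySem.Str.lower (PySem.Str.strip p)
    if pc = "" then pvALoop teks rest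
    else if teks == pc || PySem.Str.startswith teks (pc ++ " ") then true
    else pvALoop teks rest

def perintah_diizinkan_oleh_prefix (perintah : String) (daftar_prefix : List String) : Bool :=
  let teks := PySem.Str.lower (PySem.Str.strip perintah)
  if teks = "" then false
  else pvALoop teks daftar_prefix

-- ===== PORT B =====
-- the 'for i in range(len(teks))' loop with its early return
def pvBLoop (teks : String) (allowed : PySem.Set String) : List Nat → Bool
  | [] => false
  | i :: rest =>
    if PySem.Str.pyGet? teks (i : Int) == some ' ' &&
       PySem.Set.contains allowed (PySem.Str.slice teks none (some (i : Int))) then true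
    else pvBLoop teks allowed rest

def perintah_diizinkan_oleh_prefix_alt (perintah : String) (daftar_prefix : List String) : Bool :=
  let teks := PySem.Str.lower (PySem.Str.strip perintah)
  if teks = "" then false
  else
    let allowed : PySem.Set String :=
      PySem.Set.ofList ((daftar_prefix.map (fun q => PySem.Str.lower (PySem.Str.strip q))).filter
        (fun p => !(p == "")))
    if PySem.Set.contains allowed teks then true
    else pvBLoop teks allowed (List.range teks.toList.length)

-- ===== PRECONDITION & SPEC =====
def Spec_perintah_diizinkan_oleh_prefix (perintah : String) (daftar_prefix : List String) (out : Bool) : Prop := out = perintah_diizinkan_oleh_prefix_alt perintah daftar_prefix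
instance (perintah : String) (daftar_prefix : List String) (out : Bool) : Decidable (Spec_perintah_diizinkan_oleh_prefix perintah daftar_prefix out) := by unfold Spec_perintah_diizinkan_oleh_prefix; infer_instance

-- ===== CLAIM (what is proved, stated in full; the proofs are below) =====
def Claim_equal_perintah_diizinkan_oleh_prefix : Prop := ∀ (perintah : String) (daftar_prefix : List String), Dom_perintah_diizinkan_oleh_prefix perintah daftar_prefix → Spec_perintah_diizinkan_oleh_prefix perintah daftar_prefix (perintah_diizinkan_oleh_prefix perintah daftar_prefix)

-- ===== LEMMAS AND PROOFS =====

theorem pv_toList_inj {s t : String} (h : s.toList = t.toList) : s = t := by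
  have h2 := congrArg String.ofList h
  simpa using h2

-- the common characterisation both ports are reduced to
def pvHit (teks : String) (daftar_prefix : List String) : Prop :=
  ¬ teks = "" ∧ ∃ p ∈ daftar_prefix,
    ¬ PySem.Str.lower (PySem.Str.strip p) = "" ∧
    (teks = PySem.Str.lower (PySem.Str.strip p) ∨
     PySem.Str.startswith teks (PySem.Str.lower (PySem.Str.strip p) ++ " ") = true)

theorem pvALoop_iff (teks : String) (l : List String) :
    pvALoop teks l = true ↔ ∃ p ∈ l,
      ¬ PySem.Str.lower (PySem.Str.strip p) = "" ∧
      (teks = PySem.Str.lower (PySem.Str.strip p) ∨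
       PySem.Str.startswith teks (PySem.Str.lower (PySem.Str.strip p) ++ " ") = true) := by
  induction l with
  | nil => simp [pvALoop]
  | cons p rest ih =>
    simp only [pvALoop]
    split_ifs with h1 h2
    · rw [ih]
      constructor
      · rintro ⟨q, hq, hh⟩
        exact ⟨q, List.mem_cons_of_mem _ hq, hh⟩
      · rintro ⟨q, hq, hh⟩
        rcases List.mem_cons.mp hq with rfl | hq'
        · exact absurd h1 hh.1
        · exact ⟨q, hq', hh⟩
    · simp only [Bool.or_eq_true, beq_iff_eq] at h2
      exact iff_of_true rfl ⟨p, by simp, h1, h2⟩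
    · rw [ih]
      constructor
      · rintro ⟨q, hq, hh⟩
        exact ⟨q, List.mem_cons_of_mem _ hq, hh⟩
      · rintro ⟨q, hq, hh⟩
        rcases List.mem_cons.mp hq with rfl | hq'
        · exfalso
          apply h2
          simp only [Bool.or_eq_true, beq_iff_eq]
          exact hh.2
        · exact ⟨q, hq', hh⟩

theorem pvBLoop_iff (teks : String) (allowed : PySem.Set String) (l : List Nat) :
    pvBLoop teks allowed l = true ↔ ∃ i ∈ l,
      PySem.Str.pyGet? teks (i : Int) = some ' ' ∧
      PySem.Set.contains allowed (PySem.Str.slice teks none (some (i : Int))) = true := by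
  induction l with
  | nil => simp [pvBLoop]
  | cons i rest ih =>
    simp only [pvBLoop]
    split_ifs with h1
    · simp only [Bool.and_eq_true, beq_iff_eq] at h1
      exact iff_of_true rfl ⟨i, by simp, h1⟩
    · rw [ih]
      constructor
      · rintro ⟨j, hj, hh⟩
        exact ⟨j, List.mem_cons_of_mem _ hj, hh⟩
      · rintro ⟨j, hj, hh⟩
        rcases List.mem_cons.mp hj with rfl | hj'
        · exfalso
          apply h1
          simp only [Bool.and_eq_true, beq_iff_eq]
          exact hh
        · exact ⟨j, hj', hh⟩

-- 'teks.startswith(pc + " ")' holds iff some space position i of teks has teks[:i] = pc (as lists)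
theorem pv_sw_iff (tl q : List Char) :
    (q ++ [' ']) <+: tl ↔ ∃ i < tl.length, tl[i]? = some ' ' ∧ tl.take i = q := by
  constructor
  · rintro ⟨rest, hr⟩
    subst hr
    refine ⟨q.length, by simp, ?_, ?_⟩
    · rw [List.append_assoc, List.getElem?_append_right le_rfl]
      simp
    · rw [List.append_assoc, List.take_left]
  · rintro ⟨i, hi, hsp, htk⟩
    have h1 : tl.take (i + 1) = q ++ [' '] := by
      rw [List.take_add_one, htk, hsp]
      rfl
    rw [← h1]
    exact List.take_prefix _ _

theorem pv_sw_str_iff (teks pc : String) :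
    PySem.Str.startswith teks (pc ++ " ") = true ↔
      (pc.toList ++ [' ']) <+: teks.toList := by
  rw [PySem.Str.startswith_eq, PySem.Chars.startswith_iff]
  have h : (pc ++ " ").toList = pc.toList ++ [' '] := by
    rw [String.toList_append]
    rfl
  rw [h]

theorem pv_slice_toList (teks : String) (i : Nat) :
    (PySem.Str.slice teks none (some (i : Int))).toList = teks.toList.take i := by
  rw [PySem.Str.toList_slice, PySem.Chars.slice_eq_listSlice, PySem.List.slice_to_natCast]

-- A's port hits exactly pvHit
theorem pvA_iff (perintah : String) (daftar_prefix : List String) :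
    perintah_diizinkan_oleh_prefix perintah daftar_prefix = true ↔
      pvHit (PySem.Str.lower (PySem.Str.strip perintah)) daftar_prefix := by
  unfold perintah_diizinkan_oleh_prefix pvHit
  by_cases h0 : PySem.Str.lower (PySem.Str.strip perintah) = ""
  · simp [h0]
  · simp only [if_neg h0, pvALoop_iff]
    simp [h0]

-- B's port hits exactly pvHit
theorem pvB_iff (perintah : String) (daftar_prefix : List String) :
    perintah_diizinkan_oleh_prefix_alt perintah daftar_prefix = true ↔
      pvHit (PySem.Str.lower (PySem.Str.strip perintah)) daftar_prefix := by
  unfold perintah_diizinkan_oleh_prefix_alt pvHit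
  by_cases h0 : PySem.Str.lower (PySem.Str.strip perintah) = ""
  · simp [h0]
  · set teks := PySem.Str.lower (PySem.Str.strip perintah) with hteks
    set F := (daftar_prefix.map (fun q => PySem.Str.lower (PySem.Str.strip q))).filter
      (fun p => !(p == "")) with hF
    have hmemF : ∀ pc : String, pc ∈ F ↔
        (∃ p ∈ daftar_prefix, PySem.Str.lower (PySem.Str.strip p) = pc) ∧ ¬ pc = "" := by
      intro pc
      rw [hF]
      simp [List.mem_filter, List.mem_map]
    have hifB : ∀ (c l : Bool), (if c = true then true else l) = true ↔ (c = true ∨ l = true) := by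
      intro c l
      cases c <;> simp
    simp only [if_neg h0]
    rw [hifB]
    simp only [pvBLoop_iff, PySem.Set.contains_iff, PySem.Set.mem_ofList,
      List.mem_range, PySem.Str.pyGet?_natCast]
    constructor
    · rintro (hmem | ⟨i, hi, hsp, hmem⟩)
      · rcases (hmemF _).mp hmem with ⟨⟨p, hp, hcp⟩, hne⟩
        exact ⟨h0, p, hp, by rw [hcp]; exact hne, Or.inl hcp.symm⟩
      · rcases (hmemF _).mp hmem with ⟨⟨p, hp, hcp⟩, hne⟩
        refine ⟨h0, p, hp, by rw [hcp]; exact hne, Or.inr ?_⟩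
        rw [pv_sw_str_iff, pv_sw_iff]
        refine ⟨i, hi, hsp, ?_⟩
        rw [← pv_slice_toList teks i, hcp]
    · rintro ⟨-, p, hp, hne, (heq | hsw)⟩
      · exact Or.inl ((hmemF _).mpr ⟨⟨p, hp, heq.symm⟩, h0⟩)
      · rw [pv_sw_str_iff, pv_sw_iff] at hsw
        rcases hsw with ⟨i, hi, hsp, htk⟩
        refine Or.inr ⟨i, hi, hsp, (hmemF _).mpr ⟨⟨p, hp, ?_⟩, ?_⟩⟩
        · exact pv_toList_inj (by rw [pv_slice_toList teks i, htk])
        · intro hcon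
          apply hne
          apply pv_toList_inj
          have := congrArg String.toList hcon
          rw [pv_slice_toList teks i, htk] at this
          simpa using this

-- ===== VERDICT (by name: the statement is the Claim_ definition above) =====
theorem perintah_diizinkan_oleh_prefix_spec : Claim_equal_perintah_diizinkan_oleh_prefix := by
  intro perintah daftar_prefix _
  unfold Spec_perintah_diizinkan_oleh_prefix
  rw [Bool.eq_iff_iff, pvA_iff, pvB_iff]
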